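-- pv_equiv track=rewrite | github.com/TheKex/pytest_basic_use | sorting.py | get_cources_sorted_by_duration
-- ===== SOURCE A (Python) =====
-- def get_cources_sorted_by_duration(courses, durations):
--     courses_list = []
--     for course, duration in zip(courses, durations):
--         course_dict = {"title": course, "duration": duration}
--         courses_list.append(course_dict)
--
--     durations_dict = {}
--
--     for item in courses_list:
--         key = str(item["duration"])
--         if key in durations_dict:
--             durations_dict[key] += [item["title"]]
--         else:
--             durations_dict[key] = [item["title"]]
--     durations_dict = dict(sorted(durations_dict.items()))
--
--     return durations_dict
-- ===== SOURCE B (Python) =====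
-- def get_cources_sorted_by_duration(courses, durations):
--     # sort the (title, duration) pairs once by str(duration) (stable),
--     # then collect consecutive runs of equal keys into groups
--     pairs = sorted(zip(courses, durations), key=lambda p: str(p[1]))
--     groups = []
--     for title, duration in pairs:
--         key = str(duration)
--         if groups and groups[-1][0] == key:
--             groups[-1][1].append(title)
--         else:
--             groups.append((key, [title]))
--     return dict(groups)
-- ===== Notes on version B (the rewrite author's own statement) =====
-- stated objective: alternative
-- what changed: B replaces A's hash-group-into-dict-then-sort-keys with a single stable sort of the (title, duration) pairs by str(duration) followed by one consecutive-run grouping pass.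
import Mathlib
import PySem

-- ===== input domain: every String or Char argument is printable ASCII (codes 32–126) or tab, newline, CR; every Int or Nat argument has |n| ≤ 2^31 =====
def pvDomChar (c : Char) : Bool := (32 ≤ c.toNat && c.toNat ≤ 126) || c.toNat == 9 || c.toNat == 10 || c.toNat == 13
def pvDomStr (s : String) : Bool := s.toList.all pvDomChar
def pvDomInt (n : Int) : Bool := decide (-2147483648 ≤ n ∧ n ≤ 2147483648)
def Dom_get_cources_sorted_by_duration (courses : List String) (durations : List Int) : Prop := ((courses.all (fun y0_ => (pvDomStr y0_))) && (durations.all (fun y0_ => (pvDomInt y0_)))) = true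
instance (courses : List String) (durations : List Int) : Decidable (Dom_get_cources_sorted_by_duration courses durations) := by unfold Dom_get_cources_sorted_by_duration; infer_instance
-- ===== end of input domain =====

-- ===== PORT A =====
-- B groups by sorting once and collecting consecutive runs instead of A's hash-group-then-sort (objective: alternative).
-- Python's dict {"title": c, "duration": d} with these two fixed keys is ported as the pair (c, d)
-- (item["title"] = .1, item["duration"] = .2); Python's sorted(durations_dict.items()) compares
-- (key, value) tuples, but dict keys are distinct so the value is never compared: key (·.1) is exact.
def get_cources_sorted_by_duration (courses : List String) (durations : List Int) : List (String × List String) :=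
  let courses_list : List (String × Int) :=
    (courses.zip durations).foldl (fun acc cd => acc ++ [(cd.1, cd.2)]) []
  let durations_dict : PySem.Dict String (List String) :=
    courses_list.foldl (fun d item =>
      let key := PySem.Int.toStr item.2
      if d.contains key then
        d.insert key (d.getD key [] ++ [item.1])
      else
        d.insert key [item.1]) PySem.Dict.empty
  (PySem.Dict.ofList (PySem.List.sorted durations_dict.items (fun p => p.1) false)).items

-- ===== PORT B =====
def get_cources_sorted_by_duration_alt (courses : List String) (durations : List Int) : List (String × List String) :=
  let pairs := PySem.List.sorted (courses.zip durations) (fun p => PySem.Int.toStr p.2) false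
  let groups : List (String × List String) :=
    pairs.foldl (fun gs td =>
      let key := PySem.Int.toStr td.2
      match gs.getLast? with
      | some last =>
          if last.1 == key then gs.dropLast ++ [(last.1, last.2 ++ [td.1])]
          else gs ++ [(key, [td.1])]
      | none => [(key, [td.1])]) []
  (PySem.Dict.ofList groups).items

-- ===== PRECONDITION & SPEC =====

def Spec_get_cources_sorted_by_duration (courses : List String) (durations : List Int) (out : List (String × List String)) : Prop := out = get_cources_sorted_by_duration_alt courses durations
instance (courses : List String) (durations : List Int) (out : List (String × List String)) : Decidable (Spec_get_cources_sorted_by_duration courses durations out) := by unfold Spec_get_cources_sorted_by_duration; infer_instance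

-- ===== CLAIM (what is proved, stated in full; the proofs are below) =====
def Claim_equal_get_cources_sorted_by_duration : Prop := ∀ (courses : List String) (durations : List Int), Dom_get_cources_sorted_by_duration courses durations → Spec_get_cources_sorted_by_duration courses durations (get_cources_sorted_by_duration courses durations)

-- ===== LEMMAS AND PROOFS =====
set_option maxHeartbeats 1000000

def pvKeyf (p : String × Int) : String := PySem.Int.toStr p.2
def pvVal (pairs : List (String × Int)) (c : String) : List String :=
  (pairs.filter (fun p => pvKeyf p == c)).map (fun p => p.1)

lemma pv_items_ofList_of_nodup (l : List (String × List String))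
    (h : (l.map Prod.fst).Nodup) : (PySem.Dict.ofList l).items = l := by
  have h1 : ∀ a ∈ l, (PySem.Dict.empty : PySem.Dict String (List String)).contains a.1 = false := by
    intro a _; simp [PySem.Dict.contains_empty]
  have h2 := PySem.Dict.items_foldl_insert_fresh l Prod.fst Prod.snd PySem.Dict.empty h1 h
  simpa [PySem.Dict.ofList, PySem.Dict.update, PySem.Dict.empty] using h2

lemma pv_dedup_append_singleton (K : List String) (k : String) :
    PySem.List.dedup (K ++ [k]) =
      if k ∈ K then PySem.List.dedup K else PySem.List.dedup K ++ [k] := by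
  have : PySem.List.dedup (K ++ [k]) = PySem.Set.add (PySem.List.dedup K) k := by
    simp [PySem.List.dedup, PySem.Set.ofList_eq_foldl, List.foldl_append]
  rw [this]
  by_cases hm : k ∈ K
  · simp [PySem.Set.add, PySem.List.dedup, PySem.Set.mem_ofList, hm]
  · simp [PySem.Set.add, PySem.List.dedup, PySem.Set.mem_ofList, hm]

lemma pv_dedup_pairwise_lt (K : List String) (h : K.Pairwise (· ≤ ·)) :
    (PySem.List.dedup K).Pairwise (· < ·) := by
  induction K using List.reverseRecOn with
  | nil => simp [PySem.List.dedup, PySem.Set.ofList_eq_foldl]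
  | append_singleton l k ih =>
    rw [pv_dedup_append_singleton]
    rw [List.pairwise_append] at h
    by_cases hm : k ∈ l
    · simpa [hm] using ih h.1
    · simp only [hm, if_false]
      refine List.pairwise_append.mpr ⟨ih h.1, List.pairwise_singleton _ _, ?_⟩
      intro a ha b hb
      simp only [List.mem_singleton] at hb
      subst hb
      have ha' : a ∈ l := (PySem.List.mem_dedup l a).mp ha
      have hle : a ≤ b := h.2.2 a ha' b (List.mem_singleton_self _)
      have hne : a ≠ b := fun he => hm (he ▸ ha')
      exact lt_of_le_of_ne hle hne

lemma pv_dd_getD (pairs : List (String × Int)) (c : String) :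
    (pairs.foldl (fun d item => d.modify (pvKeyf item) [] (· ++ [item.1]))
      PySem.Dict.empty).getD c [] = pvVal pairs c := by
  have h1 : pairs.foldl (fun d item => d.modify (pvKeyf item) [] (· ++ [item.1]))
      PySem.Dict.empty
      = (pairs.map (fun p => (pvKeyf p, p.1))).foldl
          (fun d q => d.modify q.1 [] (· ++ [q.2])) PySem.Dict.empty := by
    rw [List.foldl_map]
  rw [h1, PySem.Dict.getD_foldl_modify_append]
  simp [pvVal, List.filter_map, List.map_map, Function.comp_def, PySem.Dict.getD_empty]

lemma pv_dd_keys (pairs : List (String × Int)) :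
    (pairs.foldl (fun d item => d.modify (pvKeyf item) [] (· ++ [item.1]))
      PySem.Dict.empty).keys = PySem.Set.ofList (pairs.map pvKeyf) := by
  rw [PySem.Dict.keys_foldl_modify_key pairs pvKeyf [] (fun _ item => (· ++ [item.1]))]
  simp [PySem.Dict.keys_empty, PySem.Set.update, PySem.Set.ofList_eq_foldl]

def pvCanon (pairs : List (String × Int)) : List (String × List String) :=
  (PySem.List.sorted (PySem.Set.ofList (pairs.map pvKeyf)) (fun k => k) false).map
    (fun k => (k, pvVal pairs k))

lemma pv_A_eq_canon (courses : List String) (durations : List Int) :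
    get_cources_sorted_by_duration courses durations = pvCanon (courses.zip durations) := by
  simp only [get_cources_sorted_by_duration]
  have hcl : (courses.zip durations).foldl (fun acc cd => acc ++ [(cd.1, cd.2)])
      ([] : List (String × Int)) = courses.zip durations := by
    rw [PySem.List.foldl_append_singleton_eq_map (fun cd : String × Int => (cd.1, cd.2))]
    simp
  rw [hcl]
  have hstep : (courses.zip durations).foldl (fun d item =>
        let key := PySem.Int.toStr item.2
        if d.contains key then d.insert key (d.getD key [] ++ [item.1])
        else d.insert key [item.1]) PySem.Dict.empty
      = (courses.zip durations).foldl
          (fun d item => d.modify (pvKeyf item) [] (· ++ [item.1])) PySem.Dict.empty := by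
    apply PySem.List.foldl_congr_mem
    intro d item _
    simp only [pvKeyf, PySem.Dict.modify]
    by_cases hc : d.contains (PySem.Int.toStr item.2) = true
    · simp [hc]
    · simp only [Bool.not_eq_true] at hc
      rw [PySem.Dict.getD_of_not_contains d [] hc]
      simp [hc]
  rw [hstep]
  set pairs := courses.zip durations with hp
  set dd := pairs.foldl (fun d item => d.modify (pvKeyf item) [] (· ++ [item.1]))
    PySem.Dict.empty with hdd
  have hnd : dd.keys.Nodup := by
    apply PySem.Dict.nodup_keys_foldl_modify_key pairs pvKeyf [] (fun _ item => (· ++ [item.1]))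
    simp [PySem.Dict.keys_empty]
  have hitems : dd.items = (PySem.Set.ofList (pairs.map pvKeyf)).map
      (fun k => (k, pvVal pairs k)) := by
    rw [PySem.Dict.items_eq_map_keys dd hnd [], hdd, pv_dd_keys]
    exact List.map_congr_left (fun k _ => by rw [← hdd, hdd, pv_dd_getD])
  have hlt := PySem.List.sorted_ofList_pairwise_lt (xs := pairs.map pvKeyf)
  have hsorted : PySem.List.sorted dd.items (fun p => p.1) false
      = (PySem.List.sorted (PySem.Set.ofList (pairs.map pvKeyf)) (fun k => k) false).map
          (fun k => (k, pvVal pairs k)) := by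
    apply PySem.List.sorted_eq_of_perm_of_pairwise_lt
    · rw [hitems]
      exact (PySem.List.sorted_perm _ _ false).map _
    · exact List.pairwise_map.mpr (hlt.imp (fun hab => hab))
  rw [hsorted, pv_items_ofList_of_nodup]
  · rfl
  · rw [List.map_map]
    have hcomp : (Prod.fst ∘ fun k : String => (k, pvVal pairs k)) = id := rfl
    rw [hcomp, List.map_id]
    exact hlt.imp (fun hab => ne_of_lt hab)

def pvStep (gs : List (String × List String)) (td : String × Int) : List (String × List String) :=
  match gs.getLast? with
  | some last =>
      if last.1 == pvKeyf td then gs.dropLast ++ [(last.1, last.2 ++ [td.1])]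
      else gs ++ [(pvKeyf td, [td.1])]
  | none => [(pvKeyf td, [td.1])]

lemma pv_filter_insertBy (x : String × Int) (c : String) (ys : List (String × Int))
    (h : ys.Pairwise (fun a b => pvKeyf a ≤ pvKeyf b)) :
    (PySem.List.insertBy (fun a b => decide (pvKeyf a < pvKeyf b)) x ys).filter
        (fun y => pvKeyf y == c)
      = if pvKeyf x == c then ys.filter (fun y => pvKeyf y == c) ++ [x]
        else ys.filter (fun y => pvKeyf y == c) := by
  induction ys with
  | nil =>
    by_cases hx : (pvKeyf x == c) = true
    · simp [PySem.List.insertBy, hx]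
    · simp [PySem.List.insertBy, hx]
  | cons y ys ih =>
    rw [List.pairwise_cons] at h
    simp only [PySem.List.insertBy]
    by_cases hlt : pvKeyf x < pvKeyf y
    · simp only [hlt, decide_true, if_true]
      by_cases hx : (pvKeyf x == c) = true
      · have hxc : pvKeyf x = c := eq_of_beq hx
        have hnil : (y :: ys).filter (fun z => pvKeyf z == c) = [] := by
          apply List.filter_eq_nil_iff.mpr
          intro z hz
          have hyz : pvKeyf y ≤ pvKeyf z := by
            rcases List.mem_cons.mp hz with rfl | hz'
            · exact le_refl _
            · exact h.1 z hz'
          have hcz : c < pvKeyf z := lt_of_lt_of_le (hxc ▸ hlt) hyz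
          simp only [beq_iff_eq]
          exact fun he => absurd he (ne_of_gt hcz)
        rw [if_pos hx, hnil]
        simp [hx, hnil]
      · rw [if_neg (by simpa using hx)]
        simp [hx]
    · simp only [hlt, decide_false, Bool.false_eq_true, if_false, List.filter_cons]
      rw [ih h.2]
      by_cases hy : (pvKeyf y == c) = true <;> by_cases hx : (pvKeyf x == c) = true <;>
        simp [hy, hx]

lemma pv_filter_sorted (xs : List (String × Int)) (c : String) :
    (PySem.List.sorted xs pvKeyf false).filter (fun y => pvKeyf y == c)
      = xs.filter (fun y => pvKeyf y == c) := by
  induction xs using List.reverseRecOn with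
  | nil => rfl
  | append_singleton l x ih =>
    have hins : PySem.List.sorted (l ++ [x]) pvKeyf false
        = PySem.List.insertBy (fun a b => decide (pvKeyf a < pvKeyf b)) x
            (PySem.List.sorted l pvKeyf false) := by
      rw [PySem.List.sorted_eq_foldl_insertBy, PySem.List.sorted_eq_foldl_insertBy,
        List.foldl_append]
      rfl
    rw [hins, pv_filter_insertBy x c _ (PySem.List.sorted_pairwise l pvKeyf)]
    by_cases hx : (pvKeyf x == c) = true
    · rw [if_pos hx, ih]
      simp [List.filter_append, hx]
    · rw [if_neg (by simpa using hx), ih]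
      simp [List.filter_append, hx]

lemma pv_groups_eq (L : List (String × Int)) (h : (L.map pvKeyf).Pairwise (· ≤ ·)) :
    L.foldl pvStep [] =
      (PySem.List.dedup (L.map pvKeyf)).map
        (fun k => (k, (L.filter (fun p => pvKeyf p == k)).map (fun p => p.1))) := by
  induction L using List.reverseRecOn with
  | nil => rfl
  | append_singleton l p ih =>
    rw [List.map_append, List.pairwise_append] at h
    obtain ⟨h1, -, hcross⟩ := h
    have hcross' : ∀ a ∈ l.map pvKeyf, a ≤ pvKeyf p := by
      intro a ha; exact hcross a ha _ (by simp)
    rw [List.foldl_append, ih h1, List.foldl_cons, List.foldl_nil, List.map_append]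
    have hDlt : (PySem.List.dedup (l.map pvKeyf)).Pairwise (· < ·) :=
      pv_dedup_pairwise_lt _ h1
    cases hlast : (PySem.List.dedup (l.map pvKeyf)).getLast? with
    | none =>
      have hDnil : PySem.List.dedup (l.map pvKeyf) = [] := List.getLast?_eq_none_iff.mp hlast
      have hlnil : l = [] := by
        by_contra hne
        obtain ⟨a, ha⟩ := List.exists_mem_of_ne_nil _ hne
        have hmem : pvKeyf a ∈ PySem.List.dedup (l.map pvKeyf) :=
          (PySem.List.mem_dedup _ _).mpr (List.mem_map_of_mem ha)
        rw [hDnil] at hmem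
        exact absurd hmem (List.not_mem_nil)
      subst hlnil
      simp [pvStep, List.filter_cons, PySem.List.dedup, PySem.Set.ofList_eq_foldl,
        PySem.Set.add]
    | some lk =>
      obtain ⟨Di, hDi⟩ := List.getLast?_eq_some_iff.mp hlast
      have hmaplast : ((PySem.List.dedup (l.map pvKeyf)).map
          (fun k => (k, (l.filter (fun q => pvKeyf q == k)).map (fun q => q.1)))).getLast?
          = some (lk, (l.filter (fun q => pvKeyf q == lk)).map (fun q => q.1)) := by
        rw [List.getLast?_map, hlast]; rfl
      simp only [pvStep, hmaplast]
      by_cases hbeq : (lk == pvKeyf p) = true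
      · have hlk : lk = pvKeyf p := eq_of_beq hbeq
        rw [if_pos hbeq]
        have hkK : pvKeyf p ∈ l.map pvKeyf := by
          have hlkD : lk ∈ PySem.List.dedup (l.map pvKeyf) := by rw [hDi]; simp
          exact hlk ▸ (PySem.List.mem_dedup _ _).mp hlkD
        simp only [List.map_cons, List.map_nil]
        rw [pv_dedup_append_singleton, if_pos hkK]
        rw [hDi, List.map_append, List.map_append]
        simp only [List.map_cons, List.map_nil]
        rw [List.dropLast_concat]
        rw [hDi, List.pairwise_append] at hDlt
        congr 1
        · apply List.map_congr_left
          intro a ha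
          have halt : a < lk := hDlt.2.2 a ha lk (by simp)
          have hane : ¬ (pvKeyf p == a) = true := by
            simp only [beq_iff_eq]
            exact fun he => absurd (he ▸ (hlk ▸ halt)) (lt_irrefl _)
          simp [List.filter_append, hane]
        · simp [List.filter_append, hlk]
      · have hlkne : lk ≠ pvKeyf p := by simpa [beq_iff_eq] using hbeq
        rw [if_neg hbeq]
        simp only [List.map_cons, List.map_nil]
        have hkK : pvKeyf p ∉ l.map pvKeyf := by
          intro hkK
          have hkD : pvKeyf p ∈ PySem.List.dedup (l.map pvKeyf) :=
            (PySem.List.mem_dedup _ _).mpr hkK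
          have hlkK : lk ∈ l.map pvKeyf := (PySem.List.mem_dedup _ _).mp (by rw [hDi]; simp)
          have hlkle : lk ≤ pvKeyf p := hcross' lk hlkK
          rw [hDi] at hkD
          rcases List.mem_append.mp hkD with hki | hkl
          · rw [hDi, List.pairwise_append] at hDlt
            have : pvKeyf p < lk := hDlt.2.2 _ hki lk (by simp)
            exact absurd (lt_of_le_of_lt hlkle this) (lt_irrefl _)
          · have he : pvKeyf p = lk := by simpa using hkl
            exact hlkne he.symm
        rw [pv_dedup_append_singleton, if_neg hkK, List.map_append]
        congr 1
        · apply List.map_congr_left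
          intro a ha
          have haK : a ∈ l.map pvKeyf := (PySem.List.mem_dedup _ _).mp ha
          have hane : ¬ (pvKeyf p == a) = true := by
            simp only [beq_iff_eq]
            exact fun he => hkK (he ▸ haK)
          simp [List.filter_append, hane]
        · have hnil : l.filter (fun q => pvKeyf q == pvKeyf p) = [] := by
            apply List.filter_eq_nil_iff.mpr
            intro q hq
            simp only [beq_iff_eq]
            exact fun he => hkK (he ▸ List.mem_map_of_mem hq)
          simp [List.filter_append, List.filter_cons, hnil]

lemma pv_B_eq_canon (courses : List String) (durations : List Int) :
    get_cources_sorted_by_duration_alt courses durations = pvCanon (courses.zip durations) := by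
  simp only [get_cources_sorted_by_duration_alt]
  have hstep : (PySem.List.sorted (courses.zip durations) (fun p => PySem.Int.toStr p.2) false).foldl
      (fun gs td =>
        let key := PySem.Int.toStr td.2
        match gs.getLast? with
        | some last =>
            if last.1 == key then gs.dropLast ++ [(last.1, last.2 ++ [td.1])]
            else gs ++ [(key, [td.1])]
        | none => [(key, [td.1])]) ([] : List (String × List String))
      = (PySem.List.sorted (courses.zip durations) pvKeyf false).foldl pvStep [] := rfl
  rw [hstep, pv_groups_eq _ (PySem.List.sorted_map_key_pairwise (courses.zip durations) pvKeyf)]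
  have hded : PySem.List.dedup ((PySem.List.sorted (courses.zip durations) pvKeyf false).map pvKeyf)
      = PySem.List.sorted (PySem.Set.ofList ((courses.zip durations).map pvKeyf)) (fun k => k) false := by
    symm
    apply PySem.List.sorted_eq_of_perm_of_pairwise_lt
    · apply (List.perm_ext_iff_of_nodup ?_ ?_).mpr
      · intro a
        rw [PySem.List.mem_dedup, PySem.Set.mem_ofList]
        exact ((PySem.List.sorted_perm (courses.zip durations) pvKeyf false).map pvKeyf).mem_iff
      · exact (pv_dedup_pairwise_lt _ (PySem.List.sorted_map_key_pairwise _ pvKeyf)).imp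
          (fun hab => ne_of_lt hab)
      · exact PySem.Set.nodup_ofList _
    · exact pv_dedup_pairwise_lt _ (PySem.List.sorted_map_key_pairwise _ pvKeyf)
  rw [hded, pv_items_ofList_of_nodup]
  · unfold pvCanon
    apply List.map_congr_left
    intro k _
    have := pv_filter_sorted (courses.zip durations) k
    simp only [pvVal, this]
  · rw [List.map_map]
    have hcomp : (Prod.fst ∘ fun k : String =>
        (k, ((PySem.List.sorted (courses.zip durations) pvKeyf false).filter
          (fun p => pvKeyf p == k)).map (fun p => p.1))) = id := rfl
    rw [hcomp, List.map_id]
    exact (PySem.List.sorted_ofList_pairwise_lt (xs := (courses.zip durations).map pvKeyf)).imp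
      (fun hab => ne_of_lt hab)

-- ===== VERDICT (by name: the statement is the Claim_ definition above) =====
theorem get_cources_sorted_by_duration_spec : Claim_equal_get_cources_sorted_by_duration := by
  intro courses durations _
  unfold Spec_get_cources_sorted_by_duration
  rw [pv_A_eq_canon, pv_B_eq_canon]
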